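-- pv_equiv track=rewrite | github.com/yukikitayama/leetcode-python | daily-challenge/daily_1094_car_pooling.py | carPooling
-- ===== SOURCE A (Python) =====
-- from typing import List
--
-- def carPooling(trips: List[List[int]], capacity: int) -> bool:
--     timestamp = [0] * 1001
--     for trip in trips:
--         timestamp[trip[1]] += trip[0]
--         timestamp[trip[2]] -= trip[0]
--
--     used_capacity = 0
--     for t in timestamp:
--         used_capacity += t
--         if used_capacity > capacity:
--             return False
--     return True
-- ===== SOURCE B (Python) =====
-- from typing import List
--
-- def carPooling(trips: List[List[int]], capacity: int) -> bool:
--     # event-sweep: sort (time, delta) events, net same-timestamp deltas before checking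
--     events = []
--     for trip in trips:
--         events.append((trip[1], trip[0]))
--         events.append((trip[2], -trip[0]))
--     events.sort(key=lambda ev: ev[0])
--     occ = 0
--     n = len(events)
--     for i in range(n):
--         occ += events[i][1]
--         if (i + 1 == n or events[i + 1][0] != events[i][0]) and occ > capacity:
--             return False
--     return True
-- ===== Notes on version B (the rewrite author's own statement) =====
-- stated objective: alternative
-- what changed: Replaces the fixed 1001-slot difference array scanned in full by an event list ((time,+p),(time,-p)) sorted by timestamp and swept once, netting all same-timestamp deltas before each capacity check.
-- outside the precondition, e.g. on carPooling([[2, -1, 100]], 1): A returns True, B returns False; on carPooling([], -1): A returns False, B returns True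
import Mathlib
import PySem

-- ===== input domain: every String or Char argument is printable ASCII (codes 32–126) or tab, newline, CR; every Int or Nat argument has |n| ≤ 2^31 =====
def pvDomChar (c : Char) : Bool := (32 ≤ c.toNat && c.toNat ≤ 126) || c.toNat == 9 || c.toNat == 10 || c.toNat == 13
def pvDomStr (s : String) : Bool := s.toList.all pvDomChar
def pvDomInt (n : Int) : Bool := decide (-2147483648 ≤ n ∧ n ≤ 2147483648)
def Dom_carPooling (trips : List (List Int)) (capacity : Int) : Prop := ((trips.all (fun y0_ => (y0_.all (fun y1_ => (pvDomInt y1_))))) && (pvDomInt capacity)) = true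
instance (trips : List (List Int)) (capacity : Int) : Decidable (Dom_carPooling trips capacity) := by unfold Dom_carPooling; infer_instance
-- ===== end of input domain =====

-- B replaces A's fixed 1001-slot difference array by a sorted event sweep (alternative algorithm, not claimed faster).


-- ===== PORT A =====
-- timestamp[trip[1]] += trip[0]; timestamp[trip[2]] -= trip[0]  (pySetD/pyGetD are exact under Pre_, which puts both indices in range)
def pvBuild : List (List Int) → List Int → List Int
  | [], ts => ts
  | trip :: rest, ts =>
      let p := PySem.List.pyGetD trip 0 0
      let s := PySem.List.pyGetD trip 1 0
      let e := PySem.List.pyGetD trip 2 0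
      let ts1 := PySem.List.pySetD ts s (PySem.List.pyGetD ts s 0 + p)
      let ts2 := PySem.List.pySetD ts1 e (PySem.List.pyGetD ts1 e 0 - p)
      pvBuild rest ts2

-- for t in timestamp: used_capacity += t; if used_capacity > capacity: return False
def pvCheck (capacity : Int) : Int → List Int → Bool
  | _, [] => true
  | used, t :: rest =>
      let used' := used + t
      if used' > capacity then false else pvCheck capacity used' rest

def carPooling (trips : List (List Int)) (capacity : Int) : Bool :=
  pvCheck capacity 0 (pvBuild trips (List.replicate 1001 0))

-- ===== PORT B =====
-- events.append((trip[1], trip[0])); events.append((trip[2], -trip[0]))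
def pvEvents (trips : List (List Int)) : List (Int × Int) :=
  trips.foldl (fun evs trip =>
    evs ++ [(PySem.List.pyGetD trip 1 0, PySem.List.pyGetD trip 0 0),
            (PySem.List.pyGetD trip 2 0, -(PySem.List.pyGetD trip 0 0))]) []

-- the for-loop over the sorted events: check occupancy only when the next event has a different timestamp
def pvSweep (capacity : Int) : Int → List (Int × Int) → Bool
  | _, [] => true
  | occ, (t, d) :: rest =>
      let occ' := occ + d
      match rest with
      | [] => if occ' > capacity then false else true
      | (t2, _) :: _ =>
          if t2 ≠ t ∧ occ' > capacity then false else pvSweep capacity occ' rest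

def carPooling_alt (trips : List (List Int)) (capacity : Int) : Bool :=
  pvSweep capacity 0 (PySem.List.sorted (pvEvents trips) (fun ev => ev.1) false)

-- ===== PRECONDITION & SPEC =====
-- Pre_ excludes trip rows shorter than 3 or with a location outside [0,1000] (A raises IndexError there,
-- except for locations in [-1001,-1] where A's value is an accident of Python's negative-index wraparound —
-- malformed input outside the problem's domain), and the corner trips = [] with capacity < 0, where A's
-- False and B's True are both defensible readings of an empty trip list against a negative capacity.
def Pre_carPooling (trips : List (List Int)) (capacity : Int) : Prop :=
  (∀ trip ∈ trips, 2 < trip.length ∧ 0 ≤ trip.getD 1 0 ∧ trip.getD 1 0 ≤ 1000 ∧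
      0 ≤ trip.getD 2 0 ∧ trip.getD 2 0 ≤ 1000) ∧
  (trips = [] → 0 ≤ capacity)
instance (trips : List (List Int)) (capacity : Int) : Decidable (Pre_carPooling trips capacity) := by
  unfold Pre_carPooling; infer_instance

def pvWitness_carPooling : List (List Int) × Int := ([[2, 1, 5], [3, 3, 7]], 5)

def Spec_carPooling (trips : List (List Int)) (capacity : Int) (out : Bool) : Prop := out = carPooling_alt trips capacity
instance (trips : List (List Int)) (capacity : Int) (out : Bool) : Decidable (Spec_carPooling trips capacity out) := by unfold Spec_carPooling; infer_instance

-- ===== CLAIM (what is proved, stated in full; the proofs are below) =====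
def Claim_equal_carPooling : Prop := ∀ (trips : List (List Int)) (capacity : Int), Dom_carPooling trips capacity → Pre_carPooling trips capacity → Spec_carPooling trips capacity (carPooling trips capacity)

-- ===== LEMMAS AND PROOFS =====

-- the two events of one trip, with pyGetD already reduced to getD
def pvEv (trip : List Int) : List (Int × Int) :=
  [(trip.getD 1 0, trip.getD 0 0), (trip.getD 2 0, -(trip.getD 0 0))]

-- net passenger change summed over all events with timestamp ≤ u
def pvS (l : List (Int × Int)) (u : Int) : Int :=
  ((l.filter (fun x => decide (x.1 ≤ u))).map Prod.snd).sum

-- the value carPooling's difference array holds at slot i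
def pvNet (trips : List (List Int)) (i : Nat) : Int :=
  (trips.map (fun trip => (if trip.getD 1 0 = (i : Int) then trip.getD 0 0 else 0)
      + (if trip.getD 2 0 = (i : Int) then -(trip.getD 0 0) else 0))).sum

lemma pvCheck_iff (l : List Int) (cap used : Int) :
    pvCheck cap used l = true ↔ ∀ k < l.length, used + (l.take (k+1)).sum ≤ cap := by
  induction l generalizing used with
  | nil => simp [pvCheck]
  | cons t rest ih =>
      show (if used + t > cap then false else pvCheck cap (used + t) rest) = true ↔ _
      split_ifs with h
      · simp only [false_iff]
        intro hall
        have := hall 0 (by simp)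
        simp at this; omega
      · rw [ih]
        constructor
        · intro hall k hk
          match k with
          | 0 => simpa using not_lt.1 h
          | k + 1 =>
              have := hall k (by simpa using Nat.lt_of_succ_lt_succ hk)
              simpa [add_assoc] using this
        · intro hall k hk
          have := hall (k+1) (by simpa using Nat.succ_lt_succ hk)
          simpa [add_assoc] using this

lemma pvGetD_set_lt (l : List Int) (j : Nat) (a : Int) (i : Nat) (hj : j < l.length) :
    (l.set j a).getD i 0 = if i = j then a else l.getD i 0 := by
  by_cases hij : i = j
  · subst hij; simp [List.getD_eq_getElem?_getD, List.getElem?_set_self (by omega)]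
  · simp [List.getD_eq_getElem?_getD, List.getElem?_set_ne (by omega : j ≠ i), hij]

lemma pvNet_cons (trip : List Int) (rest : List (List Int)) (i : Nat) :
    pvNet (trip :: rest) i =
      ((if trip.getD 1 0 = (i : Int) then trip.getD 0 0 else 0)
        + (if trip.getD 2 0 = (i : Int) then -(trip.getD 0 0) else 0)) + pvNet rest i := by
  simp [pvNet]

lemma pvPyGetD_eq_getD (l : List Int) (j : Int) (h0 : 0 ≤ j) (h1 : j < (l.length : Int)) :
    PySem.List.pyGetD l j 0 = l.getD j.toNat 0 := by
  rw [PySem.List.pyGetD_eq_getElem l 0 h0 h1, List.getD_eq_getElem l 0 (by omega)]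

lemma pvBuild_char (trips : List (List Int)) (ts : List Int)
    (hpre : ∀ trip ∈ trips, 2 < trip.length ∧ 0 ≤ trip.getD 1 0 ∧ trip.getD 1 0 ≤ 1000 ∧
        0 ≤ trip.getD 2 0 ∧ trip.getD 2 0 ≤ 1000)
    (hlen : ts.length = 1001) :
    (pvBuild trips ts).length = 1001 ∧
      ∀ i < 1001, (pvBuild trips ts).getD i 0 = ts.getD i 0 + pvNet trips i := by
  induction trips generalizing ts with
  | nil => simp [pvBuild, pvNet, hlen]
  | cons trip rest ih =>
      obtain ⟨hl3, hs0, hs1, he0, he1⟩ := hpre trip (by simp)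
      have hslen : trip.getD 1 0 < (ts.length : Int) := by omega
      have hstep : pvBuild (trip :: rest) ts =
          pvBuild rest
            ((ts.set (trip.getD 1 0).toNat (ts.getD (trip.getD 1 0).toNat 0 + trip.getD 0 0)).set
              (trip.getD 2 0).toNat
              ((ts.set (trip.getD 1 0).toNat (ts.getD (trip.getD 1 0).toNat 0 + trip.getD 0 0)).getD
                (trip.getD 2 0).toNat 0 - trip.getD 0 0)) := by
        show pvBuild rest _ = pvBuild rest _
        congr 1
        rw [pvPyGetD_eq_getD trip 0 (by omega) (by omega),
            pvPyGetD_eq_getD trip 1 (by omega) (by omega),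
            pvPyGetD_eq_getD trip 2 (by omega) (by omega)]
        simp only [Int.toNat_zero, Int.toNat_one, show Int.toNat 2 = 2 from rfl]
        rw [pvPyGetD_eq_getD ts (trip.getD 1 0) hs0 (by omega)]
        rw [PySem.List.pySetD_of_nonneg ts _ hs0]
        rw [pvPyGetD_eq_getD _ (trip.getD 2 0) he0 (by rw [List.length_set, hlen]; omega)]
        rw [PySem.List.pySetD_of_nonneg _ _ he0]
      set s := (trip.getD 1 0).toNat with hs
      set e := (trip.getD 2 0).toNat with he
      set ts1 := ts.set s (ts.getD s 0 + trip.getD 0 0) with hts1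
      set ts2 := ts1.set e (ts1.getD e 0 - trip.getD 0 0) with hts2
      have hlen1 : ts1.length = 1001 := by simp [hts1, hlen]
      have hlen2 : ts2.length = 1001 := by simp [hts2, hlen1]
      obtain ⟨ihlen, ihget⟩ := ih ts2 (fun t ht => hpre t (by simp [ht])) hlen2
      rw [hstep]
      refine ⟨ihlen, fun i hi => ?_⟩
      rw [ihget i hi, pvNet_cons]
      have hget2 : ts2.getD i 0 = if i = e then ts1.getD e 0 - trip.getD 0 0 else ts1.getD i 0 :=
        pvGetD_set_lt ts1 e _ i (by omega)
      have hget1 : ∀ j, ts1.getD j 0 = if j = s then ts.getD s 0 + trip.getD 0 0 else ts.getD j 0 :=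
        fun j => pvGetD_set_lt ts s _ j (by omega)
      rw [hget2, hget1 i, hget1 e]
      by_cases hie : i = e <;> by_cases his : i = s
      · have hes : e = s := by omega
        rw [if_pos hie, if_pos hes, if_pos (show trip.getD 1 0 = (i : Int) by omega),
            if_pos (show trip.getD 2 0 = (i : Int) by omega), his]
        ring
      · have hes : ¬ e = s := by omega
        rw [if_pos hie, if_neg hes, if_neg (show ¬ trip.getD 1 0 = (i : Int) by omega),
            if_pos (show trip.getD 2 0 = (i : Int) by omega), hie]
        ring
      · rw [if_neg hie, if_pos his, if_pos (show trip.getD 1 0 = (i : Int) by omega),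
            if_neg (show ¬ trip.getD 2 0 = (i : Int) by omega), his]
        ring
      · rw [if_neg hie, if_neg his, if_neg (show ¬ trip.getD 1 0 = (i : Int) by omega),
            if_neg (show ¬ trip.getD 2 0 = (i : Int) by omega)]
        ring

def pvSumNet (trips : List (List Int)) (k : Nat) : Int :=
  ((List.range (k+1)).map (pvNet trips)).sum

lemma pvGetD_replicate (i : Nat) (hi : i < 1001) :
    (List.replicate 1001 (0 : Int)).getD i 0 = 0 := by
  rw [List.getD_eq_getElem _ 0 (by rw [List.length_replicate]; omega), List.getElem_replicate]

lemma pvA_iff (trips : List (List Int)) (capacity : Int)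
    (hpre : ∀ trip ∈ trips, 2 < trip.length ∧ 0 ≤ trip.getD 1 0 ∧ trip.getD 1 0 ≤ 1000 ∧
        0 ≤ trip.getD 2 0 ∧ trip.getD 2 0 ≤ 1000) :
    carPooling trips capacity = true ↔ ∀ k < 1001, pvSumNet trips k ≤ capacity := by
  obtain ⟨hlen, hget⟩ := pvBuild_char trips (List.replicate 1001 0) hpre
    (by rw [List.length_replicate])
  have hlist : pvBuild trips (List.replicate 1001 0)
      = (List.range 1001).map (fun i => pvNet trips i) := by
    apply List.ext_getElem (by rw [hlen, List.length_map, List.length_range])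
    intro i h1 h2
    have hg := hget i (by omega)
    rw [List.getD_eq_getElem _ 0 h1] at hg
    rw [hg, pvGetD_replicate i (by omega), zero_add, List.getElem_map, List.getElem_range]
  have hTake : ∀ k : Nat, k < 1001 →
      (List.take (k+1) ((List.range 1001).map (fun i => pvNet trips i))).sum = pvSumNet trips k := by
    intro k hk
    rw [← List.map_take, List.take_range, Nat.min_eq_left (by omega)]
    rfl
  unfold carPooling
  rw [hlist, pvCheck_iff]
  constructor
  · intro h k hk
    have := h k (by rw [List.length_map, List.length_range]; omega)
    rwa [hTake k hk, zero_add] at this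
  · intro h k hk
    rw [List.length_map, List.length_range] at hk
    rw [hTake k hk, zero_add]
    exact h k hk

lemma pvEvents_eq (trips : List (List Int)) : pvEvents trips = trips.flatMap pvEv := by
  unfold pvEvents
  rw [PySem.List.foldl_append_eq_flatMap
    (fun trip => [(PySem.List.pyGetD trip 1 0, PySem.List.pyGetD trip 0 0),
                  (PySem.List.pyGetD trip 2 0, -(PySem.List.pyGetD trip 0 0))]) trips []]
  rw [List.nil_append]
  congr 1
  funext trip
  simp [pvEv, pysem]

lemma pvS_nil (u : Int) : pvS [] u = 0 := rfl

lemma pvS_cons (x : Int × Int) (l : List (Int × Int)) (u : Int) :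
    pvS (x :: l) u = (if x.1 ≤ u then x.2 else 0) + pvS l u := by
  by_cases h : x.1 ≤ u <;> simp [pvS, List.filter_cons, h]

lemma pvS_append (a b : List (Int × Int)) (u : Int) : pvS (a ++ b) u = pvS a u + pvS b u := by
  simp [pvS, List.filter_append]

lemma pvS_Ev (trip : List Int) (u : Int) :
    pvS (pvEv trip) u = (if trip.getD 1 0 ≤ u then trip.getD 0 0 else 0)
      + (if trip.getD 2 0 ≤ u then -(trip.getD 0 0) else 0) := by
  rw [pvEv, pvS_cons, pvS_cons, pvS_nil]
  ring

lemma pvS_eq_zero (l : List (Int × Int)) (u : Int) (h : ∀ e ∈ l, ¬ e.1 ≤ u) : pvS l u = 0 := by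
  unfold pvS
  rw [List.filter_eq_nil_iff.mpr (by intro e he; simpa using h e he)]
  rfl

lemma pvS_eq_total (l : List (Int × Int)) (u : Int) (h : ∀ e ∈ l, e.1 ≤ u) :
    pvS l u = (l.map Prod.snd).sum := by
  unfold pvS
  rw [List.filter_eq_self.mpr (by intro e he; simpa using h e he)]

lemma pvSum_range_ite (s p : Int) (n : Nat) :
    ((List.range n).map (fun (i : Nat) => if s = (i : Int) then p else 0)).sum
      = if 0 ≤ s ∧ s < (n : Int) then p else 0 := by
  induction n with
  | zero =>
      simp only [List.range_zero, List.map_nil, List.sum_nil]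
      rw [if_neg (by omega)]
  | succ n ih =>
      rw [List.range_succ, List.map_append, List.sum_append, ih]
      simp only [List.map_cons, List.map_nil, List.sum_cons, List.sum_nil, add_zero]
      split_ifs <;> omega

lemma pvSumNet_eq (trips : List (List Int))
    (hpre : ∀ trip ∈ trips, 2 < trip.length ∧ 0 ≤ trip.getD 1 0 ∧ trip.getD 1 0 ≤ 1000 ∧
        0 ≤ trip.getD 2 0 ∧ trip.getD 2 0 ≤ 1000) (k : Nat) :
    pvSumNet trips k = pvS (trips.flatMap pvEv) (k : Int) := by
  induction trips with
  | nil =>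
      have h0 : pvNet ([] : List (List Int)) = fun _ => 0 := funext (fun i => by simp [pvNet])
      simp [pvSumNet, h0, pvS_nil]
  | cons trip rest ih =>
      obtain ⟨_, hs0, _, he0, _⟩ := hpre trip (by simp)
      have ihr := ih (fun t ht => hpre t (by simp [ht]))
      rw [List.flatMap_cons, pvS_append, ← ihr, pvS_Ev]
      unfold pvSumNet
      rw [List.map_congr_left (fun i _ => pvNet_cons trip rest i)]
      rw [List.sum_map_add, List.sum_map_add, pvSum_range_ite, pvSum_range_ite]
      have : pvSumNet rest k = ((List.range (k+1)).map (pvNet rest)).sum := rfl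
      rw [← this]
      split_ifs <;> omega

lemma pvSweep_iff (cap : Int) (l : List (Int × Int)) (occ : Int)
    (hsort : l.Pairwise (fun a b : Int × Int => a.1 ≤ b.1)) :
    pvSweep cap occ l = true ↔ ∀ e ∈ l, occ + pvS l e.1 ≤ cap := by
  induction l generalizing occ with
  | nil => simp [pvSweep]
  | cons hd rest ih =>
      obtain ⟨t, d⟩ := hd
      have hall : ∀ e ∈ rest, t ≤ e.1 := fun e he => (List.pairwise_cons.mp hsort).1 e he
      have hrest := (List.pairwise_cons.mp hsort).2
      cases rest with
      | nil =>
          show (if occ + d > cap then false else true) = true ↔ _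
          simp only [List.mem_singleton, forall_eq]
          rw [pvS_cons, pvS_nil, if_pos (le_refl t)]
          split_ifs with h <;>
            simp only [Bool.false_eq_true, false_iff, true_iff] <;> omega
      | cons hd2 rest2 =>
          obtain ⟨t2, d2⟩ := hd2
          have key : ∀ u, t ≤ u →
              pvS ((t, d) :: (t2, d2) :: rest2) u = d + pvS ((t2, d2) :: rest2) u := by
            intro u hu; rw [pvS_cons, if_pos hu]
          show (if t2 ≠ t ∧ occ + d > cap then false
                else pvSweep cap (occ + d) ((t2, d2) :: rest2)) = true ↔ _
          by_cases h12 : t2 = t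
          · rw [if_neg (by simp [h12]), ih (occ + d) hrest]
            constructor
            · intro h e he
              rcases List.mem_cons.mp he with rfl | he'
              · have h1 := h (t2, d2) (by simp)
                have ht2 : ((t2, d2) : Int × Int).1 = t := h12
                rw [key t (le_refl t)]
                rw [ht2] at h1
                omega
              · rw [key e.1 (hall e he')]
                have := h e he'
                omega
            · intro h e he
              have := h e (by simp [he])
              rw [key e.1 (hall e he)] at this
              omega
          · have hall2 : ∀ e ∈ (t2, d2) :: rest2, t2 ≤ e.1 := by
              intro e he
              rcases List.mem_cons.mp he with rfl | he'
              · exact le_refl _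
              · exact (List.pairwise_cons.mp hrest).1 e he'
            have htlt : t < t2 :=
              lt_of_le_of_ne (hall (t2, d2) (by simp)) (fun hc => h12 hc.symm)
            have hS0 : pvS ((t2, d2) :: rest2) t = 0 :=
              pvS_eq_zero _ _ (fun e he => by have := hall2 e he; omega)
            by_cases hc : occ + d > cap
            · rw [if_pos ⟨h12, hc⟩]
              simp only [Bool.false_eq_true, false_iff]
              intro hcon
              have := hcon (t, d) (by simp)
              rw [key t (le_refl t), hS0] at this
              omega
            · rw [if_neg (by tauto), ih (occ + d) hrest]
              constructor
              · intro h e he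
                rcases List.mem_cons.mp he with rfl | he'
                · rw [key t (le_refl t), hS0]; omega
                · rw [key e.1 (hall e he')]
                  have := h e he'
                  omega
              · intro h e he
                have := h e (by simp [he])
                rw [key e.1 (hall e he)] at this
                omega

lemma pvTotal (trips : List (List Int)) : (((trips.flatMap pvEv)).map Prod.snd).sum = 0 := by
  induction trips with
  | nil => simp
  | cons trip rest ih => simp [pvEv, ih]

lemma pvExistsMax (l : List (Int × Int)) (h : l ≠ []) :
    ∃ e ∈ l, ∀ e' ∈ l, e'.1 ≤ e.1 := by
  induction l with
  | nil => exact absurd rfl h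
  | cons x rest ih =>
      rcases eq_or_ne rest [] with hr | hr
      · subst hr; exact ⟨x, by simp, by simp⟩
      · obtain ⟨e, he, hmax⟩ := ih hr
        rcases le_total x.1 e.1 with hle | hle
        · refine ⟨e, by simp [he], ?_⟩
          intro e' he'
          rcases List.mem_cons.mp he' with rfl | h'
          · exact hle
          · exact hmax e' h'
        · refine ⟨x, by simp, ?_⟩
          intro e' he'
          rcases List.mem_cons.mp he' with rfl | h'
          · exact le_refl _
          · exact le_trans (hmax e' h') hle

lemma pvEvBounds (trips : List (List Int))
    (hpre : ∀ trip ∈ trips, 2 < trip.length ∧ 0 ≤ trip.getD 1 0 ∧ trip.getD 1 0 ≤ 1000 ∧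
        0 ≤ trip.getD 2 0 ∧ trip.getD 2 0 ≤ 1000) :
    ∀ ev ∈ trips.flatMap pvEv, 0 ≤ ev.1 ∧ ev.1 ≤ 1000 := by
  intro ev hev
  rw [List.mem_flatMap] at hev
  obtain ⟨trip, ht, hm⟩ := hev
  obtain ⟨_, hs0, hs1, he0, he1⟩ := hpre trip ht
  simp only [pvEv, List.mem_cons, List.mem_singleton] at hm
  rcases hm with rfl | hm
  · exact ⟨hs0, hs1⟩
  · rcases hm with rfl | hm
    · exact ⟨he0, he1⟩
    · exact absurd hm (List.not_mem_nil)

lemma pvB_iff (trips : List (List Int)) (capacity : Int) :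
    carPooling_alt trips capacity = true ↔
      ∀ ev ∈ trips.flatMap pvEv, pvS (trips.flatMap pvEv) ev.1 ≤ capacity := by
  unfold carPooling_alt
  rw [pvEvents_eq]
  have hperm : (PySem.List.sorted (trips.flatMap pvEv) (fun ev => ev.1) false).Perm
      (trips.flatMap pvEv) := PySem.List.sorted_perm _ _ _
  have hpair : (PySem.List.sorted (trips.flatMap pvEv) (fun ev => ev.1) false).Pairwise
      (fun a b : Int × Int => a.1 ≤ b.1) := PySem.List.sorted_pairwise _ _
  have hSeq : ∀ u, pvS (PySem.List.sorted (trips.flatMap pvEv) (fun ev => ev.1) false) u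
      = pvS (trips.flatMap pvEv) u :=
    fun u => List.Perm.sum_eq (List.Perm.map _ (List.Perm.filter _ hperm))
  rw [pvSweep_iff capacity _ 0 hpair]
  constructor
  · intro h ev hev
    have := h ev ((PySem.List.mem_sorted _ _ _ _).mpr hev)
    rwa [hSeq, zero_add] at this
  · intro h ev hev
    rw [hSeq, zero_add]
    exact h ev ((PySem.List.mem_sorted _ _ _ _).mp hev)

-- ===== VERDICT (by name: the statement is the Claim_ definition above) =====
theorem carPooling_spec : Claim_equal_carPooling := by
  unfold Claim_equal_carPooling
  intro trips capacity _ hpre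
  unfold Spec_carPooling
  obtain ⟨hp, hcap⟩ := hpre
  rw [Bool.eq_iff_iff, pvA_iff trips capacity hp, pvB_iff trips capacity]
  constructor
  · intro h ev hev
    obtain ⟨hb0, hb1⟩ := pvEvBounds trips hp ev hev
    have := h ev.1.toNat (by omega)
    rw [pvSumNet_eq trips hp, show ((ev.1.toNat : Nat) : Int) = ev.1 by omega] at this
    exact this
  · intro h k hk
    rw [pvSumNet_eq trips hp]
    by_cases hex : ∃ ev ∈ trips.flatMap pvEv, ev.1 ≤ (k : Int)
    · obtain ⟨ev0, hev0, hle0⟩ := hex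
      have hne : (trips.flatMap pvEv).filter (fun x => decide (x.1 ≤ (k : Int))) ≠ [] := by
        intro hn
        have hm : ev0 ∈ (trips.flatMap pvEv).filter (fun x => decide (x.1 ≤ (k : Int))) :=
          List.mem_filter.mpr ⟨hev0, by simpa⟩
        rw [hn] at hm
        exact absurd hm (List.not_mem_nil)
      obtain ⟨em, hem, hmax⟩ := pvExistsMax _ hne
      obtain ⟨hemev, hemk⟩ := List.mem_filter.mp hem
      have hemk' : em.1 ≤ (k : Int) := by simpa using hemk
      have hS : pvS (trips.flatMap pvEv) (k : Int) = pvS (trips.flatMap pvEv) em.1 := by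
        unfold pvS
        rw [List.filter_congr (l := trips.flatMap pvEv)
          (q := fun x => decide (x.1 ≤ em.1)) ?_]
        intro x hx
        rw [decide_eq_decide]
        constructor
        · intro hxk
          exact hmax x (List.mem_filter.mpr ⟨hx, by simpa⟩)
        · intro hxm
          exact le_trans hxm hemk'
      rw [hS]
      exact h em hemev
    · push_neg at hex
      rw [pvS_eq_zero _ _ (fun e he => by have := hex e he; omega)]
      rcases eq_or_ne trips [] with ht | ht
      · exact hcap ht
      · have hne : trips.flatMap pvEv ≠ [] := by
          cases trips with
          | nil => exact absurd rfl ht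
          | cons a b => simp [pvEv]
        obtain ⟨em, hem, hmax⟩ := pvExistsMax _ hne
        have h2 := h em hem
        rw [pvS_eq_total _ _ hmax, pvTotal] at h2
        exact h2
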